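-- pv_equiv track=rewrite | github.com/CodyMcC/micropython-tesla-ble | lib/tesla_ble/consistency_analyzer.py | identify_variable_regions
-- ===== SOURCE A (Python) =====
-- def identify_variable_regions(result):
--     """Identify contiguous regions of variable bytes.
--
--     Args:
--         result: Consistency result dict from analyze_consistency()
--
--     Returns:
--         list: List of (start, end) tuples for variable regions
--     """
--     if not result['variable_positions']:
--         return []
--
--     regions = []
--     positions = sorted(result['variable_positions'])
--
--     start = positions[0]
--     prev = positions[0]
--
--     for pos in positions[1:]:
--         if pos != prev + 1:
--             # Gap found, close current region
--             regions.append((start, prev))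
--             start = pos
--         prev = pos
--
--     # Close final region
--     regions.append((start, prev))
--
--     return regions
-- ===== SOURCE B (Python) =====
-- def identify_variable_regions(result):
--     """Identify contiguous regions of variable bytes (gap-based zip formulation)."""
--     ps = sorted(result['variable_positions'])
--     if not ps:
--         return []
--     gaps = [(a, b) for a, b in zip(ps, ps[1:]) if a + 1 != b]
--     starts = [ps[0]] + [b for _, b in gaps]
--     ends = [a for a, _ in gaps] + [ps[-1]]
--     return list(zip(starts, ends))
-- ===== Notes on version B (the rewrite author's own statement) =====
-- stated objective: alternative
-- what changed: Replaces the stateful accumulator loop (regions/start/prev mutated across iterations) with a declarative formulation: collect the gap pairs from zip(ps, ps[1:]) once, read region starts and ends directly off the gaps, and zip them together.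
import Mathlib
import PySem

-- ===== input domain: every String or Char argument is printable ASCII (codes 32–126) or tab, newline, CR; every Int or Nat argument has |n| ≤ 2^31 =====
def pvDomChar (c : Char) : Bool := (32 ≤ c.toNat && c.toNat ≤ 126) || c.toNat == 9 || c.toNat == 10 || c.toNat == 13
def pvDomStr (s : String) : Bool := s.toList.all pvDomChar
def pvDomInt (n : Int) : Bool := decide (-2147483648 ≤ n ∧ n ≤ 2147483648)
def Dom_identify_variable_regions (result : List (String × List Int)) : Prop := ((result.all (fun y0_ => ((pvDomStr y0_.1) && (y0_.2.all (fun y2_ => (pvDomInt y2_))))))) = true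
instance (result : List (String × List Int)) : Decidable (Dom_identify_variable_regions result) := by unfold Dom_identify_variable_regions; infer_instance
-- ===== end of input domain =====

-- B replaces A's stateful accumulator loop with a gap-pairs/zip formulation of the same regions.

-- ===== PORT A =====
-- loop body of A: state = (regions, start, prev)
def stepA (st : List (Int × Int) × Int × Int) (pos : Int) : List (Int × Int) × Int × Int :=
  if pos ≠ st.2.2 + 1 then (st.1 ++ [(st.2.1, st.2.2)], pos, pos) else (st.1, st.2.1, pos)

def identify_variable_regions (result : List (String × List Int)) : List (Int × Int) :=
  match List.lookup "variable_positions" result with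
  | none => []  -- KeyError in Python; excluded by Pre_
  | some vp =>
    if vp = [] then [] else
    let positions := PySem.List.sorted vp id
    match positions with
    | [] => []  -- unreachable: sorted of a nonempty list is nonempty
    | p0 :: _ =>
      -- start = positions[0]; prev = positions[0]; for pos in positions[1:]: …
      let st := (PySem.List.slice positions (some 1) none).foldl stepA ([], p0, p0)
      st.1 ++ [(st.2.1, st.2.2)]

-- ===== PORT B =====
def identify_variable_regions_alt (result : List (String × List Int)) : List (Int × Int) :=
  match List.lookup "variable_positions" result with
  | none => []  -- KeyError in Python; excluded by Pre_
  | some vp =>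
    let ps := PySem.List.sorted vp id
    match ps with
    | [] => []
    | p0 :: rest =>
      let gaps := (List.zip (p0 :: rest) (PySem.List.slice (p0 :: rest) (some 1) none)).filter
        (fun ab => ab.1 + 1 ≠ ab.2)
      let starts := p0 :: gaps.map (·.2)
      let ends := gaps.map (·.1) ++ [(p0 :: rest).getLast (List.cons_ne_nil _ _)]
      List.zip starts ends

-- ===== PRECONDITION & SPEC =====
-- A raises KeyError when the dict has no 'variable_positions' key; Pre_ requires the key.
def Pre_identify_variable_regions (result : List (String × List Int)) : Prop :=
  (List.lookup "variable_positions" result).isSome = true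
instance (result : List (String × List Int)) : Decidable (Pre_identify_variable_regions result) := by unfold Pre_identify_variable_regions; infer_instance
def pvWitness_identify_variable_regions : (List (String × List Int)) := [("variable_positions", [3, 1, 2, 7])]
def Spec_identify_variable_regions (result : List (String × List Int)) (out : List (Int × Int)) : Prop := out = identify_variable_regions_alt result
instance (result : List (String × List Int)) (out : List (Int × Int)) : Decidable (Spec_identify_variable_regions result out) := by unfold Spec_identify_variable_regions; infer_instance

-- ===== CLAIM (what is proved, stated in full; the proofs are below) =====
def Claim_equal_identify_variable_regions : Prop := ∀ (result : List (String × List Int)), Dom_identify_variable_regions result → Pre_identify_variable_regions result → Spec_identify_variable_regions result (identify_variable_regions result)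

-- ===== LEMMAS AND PROOFS =====

-- Reference recursion both ports are reduced to: current open region (start, prev), remaining positions.
def specGo : Int → Int → List Int → List (Int × Int)
  | start, prev, [] => [(start, prev)]
  | start, prev, pos :: rest =>
    if pos ≠ prev + 1 then (start, prev) :: specGo pos pos rest
    else specGo start pos rest

theorem foldA_eq_specGo (rest : List Int) : ∀ (regions : List (Int × Int)) (start prev : Int),
    (rest.foldl stepA (regions, start, prev)).1
      ++ [((rest.foldl stepA (regions, start, prev)).2.1, (rest.foldl stepA (regions, start, prev)).2.2)]
    = regions ++ specGo start prev rest := by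
  induction rest with
  | nil => intro regions start prev; simp [specGo]
  | cons pos rest ih =>
    intro regions start prev
    by_cases h : pos = prev + 1
    · have hs : stepA (regions, start, prev) pos = (regions, start, pos) := by simp [stepA, h]
      rw [List.foldl_cons, hs, ih]
      simp [specGo, h]
    · have hs : stepA (regions, start, prev) pos = (regions ++ [(start, prev)], pos, pos) := by
        simp [stepA, h]
      rw [List.foldl_cons, hs, ih]
      simp [specGo, h]

theorem zipB_eq_specGo (rest : List Int) : ∀ (s p : Int),
    List.zip (s :: ((List.zip (p :: rest) rest).filter (fun ab => ab.1 + 1 ≠ ab.2)).map (·.2))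
             (((List.zip (p :: rest) rest).filter (fun ab => ab.1 + 1 ≠ ab.2)).map (·.1)
               ++ [(p :: rest).getLast (List.cons_ne_nil _ _)])
    = specGo s p rest := by
  induction rest with
  | nil => intro s p; simp [specGo]
  | cons q rest ih =>
    intro s p
    have hlast : (p :: q :: rest).getLast (List.cons_ne_nil _ _)
        = (q :: rest).getLast (List.cons_ne_nil _ _) := by simp [List.getLast_cons]
    rw [List.zip_cons_cons, List.filter_cons, hlast]
    by_cases h : p + 1 = q
    · rw [if_neg (by simp [h])]
      rw [ih s q]
      subst h
      simp [specGo]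
    · rw [if_pos (by simpa using h)]
      simp only [List.map_cons, List.zip_cons_cons, List.cons_append]
      rw [ih q q]
      have h2 : q ≠ p + 1 := fun e => h e.symm
      simp [specGo, h2]

-- ===== VERDICT (by name: the statement is the Claim_ definition above) =====
theorem identify_variable_regions_spec : Claim_equal_identify_variable_regions := by
  intro result _hdom hpre
  unfold Spec_identify_variable_regions identify_variable_regions identify_variable_regions_alt
  cases hlk : List.lookup "variable_positions" result with
  | none => simp [Pre_identify_variable_regions, hlk] at hpre
  | some vp =>
    by_cases hvp : vp = []
    · subst hvp; simp [PySem.List.sorted]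
    · have hne : PySem.List.sorted vp id ≠ [] := by
        intro h
        have hl := PySem.List.length_sorted (xs := vp) (key := id) (rev := false)
        rw [h] at hl
        exact hvp (List.eq_nil_of_length_eq_zero hl.symm)
      simp only [if_neg hvp]
      cases hs : PySem.List.sorted vp id with
      | nil => exact absurd hs hne
      | cons p0 rest =>
        simp only [PySem.List.slice_from_one, List.tail_cons]
        rw [foldA_eq_specGo rest [] p0 p0, List.nil_append, zipB_eq_specGo rest p0 p0]
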